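-- pv_equiv track=rewrite | github.com/serinachang5/am-s19 | src/model.py | index_words
-- ===== SOURCE A (Python) =====
-- from collections import Counter
--
-- def index_words(data):
--     """
--     Indexes the words in the data tuples, with indices according to the
--     frequency of the words (from most to least frequent). Space is reserved
--     in the vocabulary for padding and unknown words.
--     """
--     all_words = []
--     for sample in data:
--         all_words += [tup[0] for tup in sample]
--     word2idx = {'<PAD>':0, '<UNK>':1}
--     word_cts = Counter(all_words).items()
--     sorted_word_cts = sorted(word_cts, key=lambda x:x[1], reverse=True)
--     for i, (word, ct) in enumerate(sorted_word_cts):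
--         word2idx[word] = i+2
--     return word2idx
-- ===== SOURCE B (Python) =====
-- from collections import Counter
--
-- def index_words(data):
--     """
--     Same vocabulary map as A, built with a bucket (counting) sort over the
--     frequency counts instead of a comparison sort (same order, same tie-breaking).
--     """
--     cnt = Counter(w for sample in data for w, *_ in sample)
--     buckets = {}
--     for w, c in cnt.items():
--         buckets.setdefault(c, []).append(w)
--     word2idx = {'<PAD>': 0, '<UNK>': 1}
--     i = 2
--     for c in range(max(cnt.values(), default=0), 0, -1):
--         for w in buckets.get(c, []):
--             word2idx[w] = i
--             i += 1
--     return word2idx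
-- ===== Notes on version B (the rewrite author's own statement) =====
-- stated objective: alternative
-- what changed: B replaces A's comparison sort of the (word, count) pairs by a counting/bucket sort: it groups the counter's words by count in first-seen order and assigns indices walking the counts from the maximum down, preserving A's most-frequent-first order and first-seen tie-breaking.
import Mathlib
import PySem

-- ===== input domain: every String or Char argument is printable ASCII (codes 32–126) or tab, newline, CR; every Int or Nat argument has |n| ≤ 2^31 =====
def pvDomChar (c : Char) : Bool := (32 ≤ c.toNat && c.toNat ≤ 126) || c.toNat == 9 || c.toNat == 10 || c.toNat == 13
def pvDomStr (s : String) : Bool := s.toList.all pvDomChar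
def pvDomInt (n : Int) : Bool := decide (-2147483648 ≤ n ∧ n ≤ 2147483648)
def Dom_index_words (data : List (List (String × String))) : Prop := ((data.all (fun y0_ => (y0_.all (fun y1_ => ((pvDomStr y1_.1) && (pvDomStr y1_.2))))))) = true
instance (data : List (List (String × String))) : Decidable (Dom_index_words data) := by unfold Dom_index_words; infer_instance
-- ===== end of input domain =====

-- B replaces A's comparison sort of the (word, count) pairs by a counting/bucket sort over
-- the frequency counts (same first-seen tie order), assigning indices with a running counter.

-- ===== PORT A =====
def index_words (data : List (List (String × String))) : List (String × Int) :=
  let all_words := data.foldl (fun acc sample => acc ++ sample.map (fun tup => tup.1)) []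
  let word2idx : PySem.Dict String Int := PySem.Dict.ofList [("<PAD>", 0), ("<UNK>", 1)]
  let word_cts := (PySem.Dict.counter all_words).items
  let sorted_word_cts := PySem.List.sorted word_cts (fun x => x.2) true
  ((PySem.List.enumerate sorted_word_cts).foldl
      (fun d p => d.insert p.2.1 (p.1 + 2)) word2idx).items

-- ===== PORT B =====
def index_words_alt (data : List (List (String × String))) : List (String × Int) :=
  let cnt := PySem.Dict.counter (data.flatMap (fun sample => sample.map (fun p => p.1)))
  let buckets := cnt.items.foldl (fun d p => d.modify p.2 [] (fun l => l ++ [p.1])) PySem.Dict.empty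
  let word2idx : PySem.Dict String Int := PySem.Dict.ofList [("<PAD>", 0), ("<UNK>", 1)]
  let maxc := PySem.List.maxD cnt.values (fun v => v) 0
  ((PySem.List.pyRange maxc 0 (-1)).foldl
      (fun di c => (buckets.getD c []).foldl (fun di w => (di.1.insert w di.2, di.2 + 1)) di)
      (word2idx, 2)).1.items

-- ===== PRECONDITION & SPEC =====
def Spec_index_words (data : List (List (String × String))) (out : List (String × Int)) : Prop := out = index_words_alt data
instance (data : List (List (String × String))) (out : List (String × Int)) : Decidable (Spec_index_words data out) := by unfold Spec_index_words; infer_instance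

-- ===== CLAIM (what is proved, stated in full; the proofs are below) =====
def Claim_equal_index_words : Prop := ∀ (data : List (List (String × String))), Dom_index_words data → Spec_index_words data (index_words data)

-- ===== LEMMAS AND PROOFS =====

-- insertBy passes over a prefix none of whose elements trigger `before`.
theorem pv_insertBy_append {α : Type} (before : α → α → Bool) (x : α) (A B : List α)
    (h : ∀ y ∈ A, before x y = false) :
    PySem.List.insertBy before x (A ++ B) = A ++ PySem.List.insertBy before x B := by
  induction A with
  | nil => simp
  | cons a t ih =>
      have ha : before x a = false := h a (by simp)
      simp [PySem.List.insertBy, ha, ih (fun y hy => h y (by simp [hy]))]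

-- inserting x (stable, descending by .2) into the bucket concatenation appends it to its bucket
theorem pv_ins (ks : List Int) (x : String × Int) (l : List (String × Int))
    (hp : ks.Pairwise (· > ·)) (hx : x.2 ∈ ks) :
    PySem.List.insertBy (fun a b => decide (b.2 < a.2)) x
        (ks.flatMap (fun c => l.filter (fun y => y.2 == c)))
      = ks.flatMap (fun c => (l ++ [x]).filter (fun y => y.2 == c)) := by
  induction ks with
  | nil => simp at hx
  | cons k ks ih =>
      have hgt : ∀ j ∈ ks, j < k := by
        intro j hj; exact (List.pairwise_cons.1 hp).1 j hj
      by_cases hk : x.2 = k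
      · -- x lands at the end of bucket k
        have hA : ∀ y ∈ l.filter (fun y => y.2 == k), (fun a b => decide (b.2 < a.2)) x y = false := by
          intro y hy
          have := (List.mem_filter.1 hy).2
          simp only [beq_iff_eq] at this
          simp [this, hk]
        have hB : PySem.List.insertBy (fun a b => decide (b.2 < a.2)) x
            (ks.flatMap (fun c => l.filter (fun y => y.2 == c)))
            = x :: ks.flatMap (fun c => l.filter (fun y => y.2 == c)) := by
          cases hBl : ks.flatMap (fun c => l.filter (fun y => y.2 == c)) with
          | nil => simp [PySem.List.insertBy]
          | cons b t =>
              have hbmem : b ∈ ks.flatMap (fun c => l.filter (fun y => y.2 == c)) := by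
                simp [hBl]
              obtain ⟨c, hc, hbf⟩ := List.mem_flatMap.1 hbmem
              have hbc : b.2 = c := by
                have := (List.mem_filter.1 hbf).2; simpa using this
              have : b.2 < x.2 := by rw [hbc, hk]; exact hgt c hc
              simp [PySem.List.insertBy, this]
        have htail : ∀ c ∈ ks, (l ++ [x]).filter (fun y => y.2 == c) = l.filter (fun y => y.2 == c) := by
          intro c hc
          have : (x.2 == c) = false := by
            have := hgt c hc; simp; omega
          simp [List.filter_append, this]
        have hhead : (l ++ [x]).filter (fun y => y.2 == k) = l.filter (fun y => y.2 == k) ++ [x] := by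
          simp [List.filter_append, hk]
        rw [List.flatMap_cons, pv_insertBy_append _ _ _ _ hA, hB,
            List.flatMap_cons, hhead]
        simp only [List.append_assoc, List.cons_append, List.nil_append]
        exact congrArg _ (congrArg _ (List.flatMap_congr (fun c hc => (htail c hc).symm)))
      · -- x belongs to a later bucket
        have hxks : x.2 ∈ ks := by
          cases List.mem_cons.1 hx with
          | inl h => exact absurd h hk
          | inr h => exact h
        have hxk : x.2 < k := hgt _ hxks
        have hA : ∀ y ∈ l.filter (fun y => y.2 == k), (fun a b => decide (b.2 < a.2)) x y = false := by
          intro y hy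
          have : y.2 = k := by have := (List.mem_filter.1 hy).2; simpa using this
          simp [this]; omega
        have hhead : (l ++ [x]).filter (fun y => y.2 == k) = l.filter (fun y => y.2 == k) := by
          have : (x.2 == k) = false := by simp [hk]
          simp [List.filter_append, this]
        rw [List.flatMap_cons, pv_insertBy_append _ _ _ _ hA,
            ih ((List.pairwise_cons.1 hp).2) hxks, List.flatMap_cons, hhead]

-- stable reverse sort by count = concatenation of the count buckets, from the max count down
theorem pv_bucket (l : List (String × Int)) (M : Int)
    (hb : ∀ x ∈ l, 0 < x.2 ∧ x.2 ≤ M) :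
    PySem.List.sorted l (fun x => x.2) true
      = (PySem.List.pyRange M 0 (-1)).flatMap (fun c => l.filter (fun y => y.2 == c)) := by
  have hp : (PySem.List.pyRange M 0 (-1)).Pairwise (· > ·) := by
    rw [PySem.List.pyRange_neg_one_eq_reverse, List.pairwise_reverse]
    simpa [gt_iff_lt] using PySem.List.pairwise_lt_pyRange_one (0 + 1) (M + 1)
  induction l using List.reverseRecOn with
  | nil => simp [PySem.List.sorted]
  | append_singleton l x ih =>
      have hx : x.2 ∈ PySem.List.pyRange M 0 (-1) := by
        rw [PySem.List.mem_pyRange_neg_one]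
        exact ⟨(hb x (by simp)).1, (hb x (by simp)).2⟩
      rw [PySem.List.sorted_rev_eq_foldl_insertBy, List.foldl_append,
          ← PySem.List.sorted_rev_eq_foldl_insertBy,
          ih (fun y hy => hb y (by simp [hy]))]
      simpa using pv_ins (PySem.List.pyRange M 0 (-1)) x l hp hx

-- A's enumerate loop = B's running-counter loop over the bare words
theorem pv_assign (ps : List (String × Int)) (d0 : PySem.Dict String Int) (s : Int) :
    (PySem.List.enumerate ps s).foldl (fun d p => d.insert p.2.1 (p.1 + 2)) d0
      = ((ps.map (fun p => p.1)).foldl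
          (fun (di : PySem.Dict String Int × Int) w => (di.1.insert w di.2, di.2 + 1)) (d0, s + 2)).1 := by
  induction ps generalizing d0 s with
  | nil => simp [PySem.List.enumerate]
  | cons p t ih =>
      rw [PySem.List.enumerate_cons]
      simp only [List.foldl_cons, List.map_cons]
      rw [ih]
      ring_nf

-- every value of a list is ≤ max(values, default=0)
theorem pv_le_maxD (vs : List Int) (v : Int) (hv : v ∈ vs) :
    v ≤ PySem.List.maxD vs (fun y => y) 0 := by
  cases vs with
  | nil => simp at hv
  | cons a t =>
      rw [PySem.List.maxD_id_cons]
      cases List.mem_cons.1 hv with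
      | inl h => rw [h]; exact (PySem.List.le_foldl_max t a).1
      | inr h => exact (PySem.List.le_foldl_max t a).2 v h

-- the buckets dict built by B groups the counter items by count, words in first-seen order
theorem pv_buckets_getD (items : List (String × Int)) (c : Int) :
    (items.foldl (fun d p => d.modify p.2 [] (fun l => l ++ [p.1]))
        (PySem.Dict.empty : PySem.Dict Int (List String))).getD c []
      = (items.filter (fun y => y.2 == c)).map (fun p => p.1) := by
  have h := PySem.Dict.getD_foldl_modify_append (items.map (fun p => (p.2, p.1)))
      (PySem.Dict.empty : PySem.Dict Int (List String)) c
  rw [List.foldl_map] at h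
  simp only [h, PySem.Dict.getD_empty, List.nil_append, List.filter_map, List.map_map]
  congr 1

theorem pv_main (data : List (List (String × String))) :
    index_words data = index_words_alt data := by
  simp only [index_words, index_words_alt]
  rw [PySem.List.foldl_append_eq_flatMap, List.nil_append]
  set ws := data.flatMap (fun sample => sample.map (fun p => p.1)) with hws
  set items := (PySem.Dict.counter ws).items with hitems
  set maxc := PySem.List.maxD (PySem.Dict.counter ws).values (fun v => v) 0 with hmaxc
  have hb : ∀ x ∈ items, 0 < x.2 ∧ x.2 ≤ maxc := by
    intro x hx
    constructor
    · rw [hitems, PySem.Dict.items_counter] at hx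
      obtain ⟨k, hk, rfl⟩ := List.mem_map.1 hx
      have : k ∈ ws := (PySem.Set.mem_ofList ws k).1 hk
      have := List.count_pos_iff.2 this
      simpa using this
    · apply pv_le_maxD
      have : (PySem.Dict.counter ws).values = items.map (fun p => p.2) := rfl
      rw [this]
      exact List.mem_map.2 ⟨x, hx, rfl⟩
  congr 1
  rw [pv_bucket items maxc hb, pv_assign _ _ 0]
  simp only [pv_buckets_getD]
  rw [List.map_flatMap, List.foldl_flatMap]
  norm_num [Function.comp]

-- ===== VERDICT (by name: the statement is the Claim_ definition above) =====
theorem index_words_spec : Claim_equal_index_words := by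
  intro data _
  unfold Spec_index_words
  exact pv_main data
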